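-- pv_equiv track=rewrite | github.com/ArenasAI/arenas | api/upload.py | is_mime_type_allowed
-- ===== SOURCE A (Python) =====
-- def is_mime_type_allowed(file_type, allowed_types):
--     """Check if file type is allowed"""
--     # Exact match
--     if file_type in allowed_types:
--         return True
--
--     # Wildcard match (image/*)
--     for allowed_type in allowed_types:
--         if allowed_type.endswith('/*'):
--             prefix = allowed_type.split('/*')[0]
--             if file_type.startswith(prefix + '/'):
--                 return True
--
--     return False
-- ===== SOURCE B (Python) =====
-- def is_mime_type_allowed(file_type, allowed_types):
--     """Check if file type is allowed.
--
--     Inverted strategy: instead of scanning allowed_types per pattern, build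
--     hash indexes once (exact set, wildcard-prefix set) and probe them with
--     file_type: exact lookup, then one lookup per '/' position in file_type.
--     """
--     if file_type in set(allowed_types):
--         return True
--     wild = {t.split('/*')[0] for t in allowed_types if t.endswith('/*')}
--     for i, ch in enumerate(file_type):
--         if ch == '/' and file_type[:i] in wild:
--             return True
--     return False
-- ===== Notes on version B (the rewrite author's own statement) =====
-- stated objective: alternative
-- what changed: Inverts the wildcard match: instead of scanning allowed_types testing each pattern against file_type, B builds hash sets once (exact types and wildcard prefixes) and probes them with file_type and each of its '/'-delimited prefixes.
import Mathlib
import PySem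

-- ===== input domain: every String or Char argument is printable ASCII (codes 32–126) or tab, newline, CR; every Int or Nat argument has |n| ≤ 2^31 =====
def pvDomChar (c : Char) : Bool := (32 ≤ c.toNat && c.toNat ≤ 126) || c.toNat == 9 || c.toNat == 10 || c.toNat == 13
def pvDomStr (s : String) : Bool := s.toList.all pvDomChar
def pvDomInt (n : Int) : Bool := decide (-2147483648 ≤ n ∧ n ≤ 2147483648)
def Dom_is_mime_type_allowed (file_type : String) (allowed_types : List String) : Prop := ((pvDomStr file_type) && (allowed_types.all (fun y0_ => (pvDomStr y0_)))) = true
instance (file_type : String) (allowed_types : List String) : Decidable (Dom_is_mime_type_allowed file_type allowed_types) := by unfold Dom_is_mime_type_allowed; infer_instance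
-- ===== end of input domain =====

-- B replaces A's per-pattern scans by hash indexes built once (exact set,
-- wildcard-prefix set) that are probed with file_type's '/'-cut prefixes;
-- alternative decomposition, same asymptotic cost.


-- ===== PORT A =====
-- prefix = allowed_type.split('/*')[0]  (sep nonempty, so split? is some; [0] is the head)
def pvSplitPrefix (t : String) : String :=
  ((PySem.Str.split? t "/*").getD []).headD ""

-- the wildcard for-loop of A, with its early return
def pvWildLoop (file_type : String) : List String → Bool
  | [] => false
  | t :: rest =>
    if PySem.Str.endswith t "/*" then
      if PySem.Str.startswith file_type (pvSplitPrefix t ++ "/") then true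
      else pvWildLoop file_type rest
    else pvWildLoop file_type rest

def is_mime_type_allowed (file_type : String) (allowed_types : List String) : Bool :=
  if allowed_types.contains file_type then true
  else pvWildLoop file_type allowed_types

-- ===== PORT B =====
-- wild = {t.split('/*')[0] for t in allowed_types if t.endswith('/*')}
def pvWildIndex (allowed_types : List String) : PySem.Set String :=
  PySem.Set.ofList ((allowed_types.filter (fun t => PySem.Str.endswith t "/*")).map
    (fun t => ((PySem.Str.split? t "/*").getD []).headD ""))

-- for i, ch in enumerate(file_type): if ch == '/' and file_type[:i] in wild: return True
def pvSlashScan (file_type : String) (wild : PySem.Set String) : List (Int × Char) → Bool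
  | [] => false
  | (i, ch) :: rest =>
    if ch == '/' && PySem.Set.contains wild (PySem.Str.slice file_type none (some i)) then true
    else pvSlashScan file_type wild rest

def is_mime_type_allowed_alt (file_type : String) (allowed_types : List String) : Bool :=
  if PySem.Set.contains (PySem.Set.ofList allowed_types) file_type then true
  else pvSlashScan file_type (pvWildIndex allowed_types)
        (PySem.List.enumerate file_type.toList 0)

-- ===== PRECONDITION & SPEC =====
def Spec_is_mime_type_allowed (file_type : String) (allowed_types : List String) (out : Bool) : Prop := out = is_mime_type_allowed_alt file_type allowed_types
instance (file_type : String) (allowed_types : List String) (out : Bool) : Decidable (Spec_is_mime_type_allowed file_type allowed_types out) := by unfold Spec_is_mime_type_allowed; infer_instance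

-- ===== CLAIM (what is proved, stated in full; the proofs are below) =====
def Claim_equal_is_mime_type_allowed : Prop := ∀ (file_type : String) (allowed_types : List String), Dom_is_mime_type_allowed file_type allowed_types → Spec_is_mime_type_allowed file_type allowed_types (is_mime_type_allowed file_type allowed_types)

-- ===== LEMMAS AND PROOFS =====
-- A's wildcard loop returns true iff some allowed pattern is a matching wildcard
theorem pvWildLoop_iff (ft : String) (l : List String) :
    pvWildLoop ft l = true ↔
      ∃ t ∈ l, PySem.Str.endswith t "/*" = true ∧
        PySem.Str.startswith ft (pvSplitPrefix t ++ "/") = true := by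
  induction l with
  | nil => simp [pvWildLoop]
  | cons t rest ih =>
    rw [pvWildLoop]
    by_cases h1 : PySem.Str.endswith t "/*" = true
    · by_cases h2 : PySem.Str.startswith ft (pvSplitPrefix t ++ "/") = true
      · rw [if_pos h1, if_pos h2]
        exact iff_of_true rfl ⟨t, by simp, h1, h2⟩
      · rw [if_pos h1, if_neg h2, ih]
        constructor
        · rintro ⟨u, hu, hu1, hu2⟩
          exact ⟨u, List.mem_cons_of_mem _ hu, hu1, hu2⟩
        · rintro ⟨u, hu, hu1, hu2⟩
          rcases List.mem_cons.mp hu with rfl | hu'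
          · exact absurd hu2 h2
          · exact ⟨u, hu', hu1, hu2⟩
    · rw [if_neg h1, ih]
      constructor
      · rintro ⟨u, hu, hu1, hu2⟩
        exact ⟨u, List.mem_cons_of_mem _ hu, hu1, hu2⟩
      · rintro ⟨u, hu, hu1, hu2⟩
        rcases List.mem_cons.mp hu with rfl | hu'
        · exact absurd hu1 h1
        · exact ⟨u, hu', hu1, hu2⟩

-- B's scan returns true iff some enumerated position carries '/' with its prefix in wild
theorem pvSlashScan_iff (ft : String) (w : PySem.Set String) (es : List (Int × Char)) :
    pvSlashScan ft w es = true ↔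
      ∃ p ∈ es, p.2 = '/' ∧ PySem.Set.contains w (PySem.Str.slice ft none (some p.1)) = true := by
  induction es with
  | nil => simp [pvSlashScan]
  | cons p rest ih =>
    obtain ⟨i, ch⟩ := p
    rw [pvSlashScan]
    by_cases h : (ch == '/' && PySem.Set.contains w (PySem.Str.slice ft none (some i))) = true
    · rw [if_pos h]
      have h' : ch = '/' ∧ PySem.Set.contains w (PySem.Str.slice ft none (some i)) = true := by
        simpa using h
      exact iff_of_true rfl ⟨(i, ch), by simp, h'.1, h'.2⟩
    · rw [if_neg h, ih]
      constructor
      · rintro ⟨q, hq, hq2, hq3⟩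
        exact ⟨q, List.mem_cons_of_mem _ hq, hq2, hq3⟩
      · rintro ⟨q, hq, hq2, hq3⟩
        rcases List.mem_cons.mp hq with rfl | hq'
        · exact absurd (by simp only [Bool.and_eq_true, beq_iff_eq]; exact ⟨hq2, hq3⟩) h
        · exact ⟨q, hq', hq2, hq3⟩

-- startswith (p ++ "/") characterised by a '/' position with matching take
theorem startswith_slash_iff (ft p : String) :
    PySem.Str.startswith ft (p ++ "/") = true ↔
      ∃ k, ∃ _ : k < ft.toList.length,
        ft.toList[k] = '/' ∧ ft.toList.take k = p.toList := by
  have hft : PySem.Str.startswith ft (p ++ "/") = true ↔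
      (p.toList ++ ['/']) <+: ft.toList := by
    rw [show PySem.Str.startswith ft (p ++ "/")
          = PySem.Chars.startswith ft.toList (p ++ "/").toList from by
        simp [PySem.Str.startswith_eq]]
    rw [PySem.Chars.startswith_iff]
    simp
  rw [hft]
  constructor
  · rintro ⟨rest, hrest⟩
    have hrest' : p.toList ++ '/' :: rest = ft.toList := by simpa using hrest
    have hk : p.toList.length < ft.toList.length := by rw [← hrest']; simp
    have hget? : ft.toList[p.toList.length]? = some '/' := by
      rw [← hrest']
      simp
    refine ⟨p.toList.length, hk, ?_, ?_⟩
    · rw [List.getElem?_eq_getElem hk] at hget?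
      exact Option.some_injective _ hget?
    · rw [← hrest']
      simp
  · rintro ⟨k, hk, hget, htake⟩
    have : p.toList ++ ['/'] = ft.toList.take (k + 1) := by
      rw [List.take_add_one, htake]
      simp [List.getElem?_eq_getElem hk, hget]
    rw [this]
    exact List.take_prefix _ _

-- membership in the wildcard-prefix index
theorem mem_pvWildIndex (ats : List String) (x : String) :
    x ∈ pvWildIndex ats ↔
      ∃ t ∈ ats, PySem.Str.endswith t "/*" = true ∧ pvSplitPrefix t = x := by
  unfold pvWildIndex
  rw [PySem.Set.mem_ofList]
  simp only [List.mem_map, List.mem_filter]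
  constructor
  · rintro ⟨t, ⟨ht, he⟩, rfl⟩; exact ⟨t, ht, he, rfl⟩
  · rintro ⟨t, ht, he, rfl⟩; exact ⟨t, ⟨ht, he⟩, rfl⟩

-- Str.slice with a natural upper bound is take on toList
theorem toList_slice_take (ft : String) (k : Nat) :
    (PySem.Str.slice ft none (some (k : Int))).toList = ft.toList.take k := by
  rw [PySem.Str.toList_slice]
  exact PySem.List.slice_to_natCast ft.toList k

-- the two wildcard mechanisms agree
theorem wild_agree (ft : String) (ats : List String) :
    pvSlashScan ft (pvWildIndex ats) (PySem.List.enumerate ft.toList 0) = pvWildLoop ft ats := by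
  rw [Bool.eq_iff_iff, pvSlashScan_iff, pvWildLoop_iff]
  constructor
  · rintro ⟨q, hq, hslash, hcont⟩
    rw [PySem.List.mem_enumerate_iff] at hq
    obtain ⟨k, hk, rfl⟩ := hq
    simp only [zero_add] at hcont hslash ⊢
    rw [PySem.Set.contains_iff, mem_pvWildIndex] at hcont
    obtain ⟨t, ht, he, hp⟩ := hcont
    refine ⟨t, ht, he, ?_⟩
    rw [startswith_slash_iff]
    exact ⟨k, hk, hslash, by rw [hp, toList_slice_take]⟩
  · rintro ⟨t, ht, he, hs⟩
    rw [startswith_slash_iff] at hs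
    obtain ⟨k, hk, hget, htake⟩ := hs
    refine ⟨((k : Int), ft.toList[k]), ?_, hget, ?_⟩
    · rw [PySem.List.mem_enumerate_iff]; exact ⟨k, hk, by simp⟩
    · rw [PySem.Set.contains_iff, mem_pvWildIndex]
      refine ⟨t, ht, he, ?_⟩
      apply String.toList_inj.mp
      rw [toList_slice_take, htake]

-- ===== VERDICT (by name: the statement is the Claim_ definition above) =====
theorem is_mime_type_allowed_spec : Claim_equal_is_mime_type_allowed := by
  intro ft ats _
  show is_mime_type_allowed ft ats = is_mime_type_allowed_alt ft ats
  unfold is_mime_type_allowed is_mime_type_allowed_alt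
  have hmem : (PySem.Set.contains (PySem.Set.ofList ats) ft) = ats.contains ft := by
    rw [Bool.eq_iff_iff, PySem.Set.contains_iff, PySem.Set.mem_ofList, List.contains_iff_mem]
  rw [hmem, wild_agree]
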